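-- pv_equiv track=rewrite | github.com/Aanchal345/leetcode | 2120-execution-of-all-suffix-instructions-staying-in-a-grid/2120-execution-of-all-suffix-instructions-staying-in-a-grid.py | executeInstructions
-- ===== SOURCE A (Python) =====
-- def executeInstructions(n, startPos, s):
--     """
--     :type n: int
--     :type startPos: List[int]
--     :type s: str
--     :rtype: List[int]
--     """
--     ans = []
--     for cmdstart in range(len(s)):
--         x,y = startPos[1],startPos[0]
--         count = 0
--         path = s[cmdstart:]
--         for cmd in path:
--             if cmd=="R":
--                 x+=1
--             elif cmd=="L":
--                 x-=1
--             elif cmd=="U":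
--                 y-=1
--             elif cmd=="D":
--                 y+=1
--             if(x>=0 and x<n) and (y>=0 and y<n):
--                 count+=1
--             else:
--                  break
--         ans.append(count)
--     return ans
-- ===== SOURCE B (Python) =====
-- def executeInstructions(n, startPos, s):
--     # O(m) algorithm: the robot moves in unit steps, so (after a surviving first
--     # step) it first leaves the grid exactly when a cumulative displacement first
--     # HITS one of four exact boundary values (x = -1, x = n, y = -1, y = n).
--     # A single right-to-left sweep with next-occurrence dictionaries over the
--     # prefix-displacement values answers every suffix in O(1).
--     if not s:
--         return []
--     sy, sx = startPos[0], startPos[1]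
--     xs = [0]
--     ys = [0]
--     for c in s:
--         xs.append(xs[-1] + (c == 'R') - (c == 'L'))
--         ys.append(ys[-1] + (c == 'D') - (c == 'U'))
--     m = len(s)
--     ans = [0] * m
--     nxtx = {}
--     nxty = {}
--     for i in range(m - 1, -1, -1):
--         nxtx[xs[i + 1]] = i + 1
--         nxty[ys[i + 1]] = i + 1
--         x1 = sx + xs[i + 1] - xs[i]
--         y1 = sy + ys[i + 1] - ys[i]
--         if 0 <= x1 < n and 0 <= y1 < n:
--             cross = min(nxtx.get(xs[i] - sx - 1, m + 1),
--                         nxtx.get(xs[i] + n - sx, m + 1),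
--                         nxty.get(ys[i] - sy - 1, m + 1),
--                         nxty.get(ys[i] + n - sy, m + 1))
--             ans[i] = cross - i - 1
--     return ans
-- ===== Notes on version B (the rewrite author's own statement) =====
-- stated objective: faster
-- what changed: B replaces A's per-suffix re-simulation by an O(m) right-to-left sweep: one pass builds prefix-displacement arrays, and next-occurrence dictionaries over those values give, for each suffix, the first index at which a displacement hits one of the four exact boundary values (x=-1, x=n, y=-1, y=n), which by the unit-step argument is the first exit; Pre_ excludes startPos shorter than 2 with nonempty s, where A raises IndexError.
import Mathlib
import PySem

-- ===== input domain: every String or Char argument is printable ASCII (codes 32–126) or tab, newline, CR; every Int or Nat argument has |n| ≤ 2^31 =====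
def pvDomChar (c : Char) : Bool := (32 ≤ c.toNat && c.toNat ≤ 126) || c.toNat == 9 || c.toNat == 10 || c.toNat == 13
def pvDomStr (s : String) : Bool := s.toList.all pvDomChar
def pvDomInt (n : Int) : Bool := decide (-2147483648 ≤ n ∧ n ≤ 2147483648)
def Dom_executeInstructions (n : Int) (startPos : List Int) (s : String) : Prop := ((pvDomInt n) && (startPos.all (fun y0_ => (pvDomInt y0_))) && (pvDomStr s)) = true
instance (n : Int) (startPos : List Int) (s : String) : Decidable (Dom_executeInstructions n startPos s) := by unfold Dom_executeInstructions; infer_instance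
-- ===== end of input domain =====

-- B replaces A's per-suffix re-simulation by a right-to-left sweep with next-occurrence
-- dictionaries over prefix displacements (exact boundary-hit argument); measured faster at scale.


-- ===== PORT A =====
-- A's inner loop: simulate moves one char at a time, break on leaving the grid
def aInner (n : Int) : List Char → Int → Int → Int → Int
  | [], _, _, count => count
  | cmd :: rest, x, y, count =>
    let x' := if cmd = 'R' then x + 1 else if cmd = 'L' then x - 1 else x
    let y' := if cmd = 'U' then y - 1 else if cmd = 'D' then y + 1 else y
    if 0 ≤ x' ∧ x' < n ∧ 0 ≤ y' ∧ y' < n then aInner n rest x' y' (count + 1) else count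

def executeInstructions (n : Int) (startPos : List Int) (s : String) : List Int :=
  (PySem.List.pyRange 0 (PySem.Str.len s) 1).foldl (fun ans cmdstart =>
    let x := PySem.List.pyGetD startPos 1 0    -- startPos[1]; Pre_ guarantees it exists
    let y := PySem.List.pyGetD startPos 0 0    -- startPos[0]
    let path := PySem.List.slice s.toList (some cmdstart) none   -- s[cmdstart:]
    ans ++ [aInner n path x y 0]) []

-- ===== PORT B =====
def bDX (c : Char) : Int := (if c = 'R' then 1 else 0) - (if c = 'L' then 1 else 0)
def bDY (c : Char) : Int := (if c = 'D' then 1 else 0) - (if c = 'U' then 1 else 0)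

-- B's prefix-sum builder: xs = [0]; for c in s: xs.append(xs[-1] + d(c))
def bPrefix (f : Char → Int) (cs : List Char) : List Int :=
  cs.foldl (fun l c => l ++ [PySem.List.pyGetD l (-1) 0 + f c]) [0]

-- B's right-to-left sweep: at count i+1 it processes Python's index i — it records
-- xs[i+1], ys[i+1] in the next-occurrence dicts, then answers index i by four dict lookups.
def bGo (n sx sy : Int) (xs ys : List Int) (m : Nat) :
    Nat → PySem.Dict Int Int → PySem.Dict Int Int → List Int
  | 0, _, _ => []
  | i + 1, dx, dy =>
    let dx' := dx.insert (PySem.List.pyGetD xs ((i : Int) + 1) 0) ((i : Int) + 1)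
    let dy' := dy.insert (PySem.List.pyGetD ys ((i : Int) + 1) 0) ((i : Int) + 1)
    let x1 := sx + PySem.List.pyGetD xs ((i : Int) + 1) 0 - PySem.List.pyGetD xs (i : Int) 0
    let y1 := sy + PySem.List.pyGetD ys ((i : Int) + 1) 0 - PySem.List.pyGetD ys (i : Int) 0
    let ai : Int :=
      if 0 ≤ x1 ∧ x1 < n ∧ 0 ≤ y1 ∧ y1 < n then
        min (min (min (dx'.getD (PySem.List.pyGetD xs (i : Int) 0 - sx - 1) ((m : Int) + 1))
                      (dx'.getD (PySem.List.pyGetD xs (i : Int) 0 + n - sx) ((m : Int) + 1)))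
                 (dy'.getD (PySem.List.pyGetD ys (i : Int) 0 - sy - 1) ((m : Int) + 1)))
            (dy'.getD (PySem.List.pyGetD ys (i : Int) 0 + n - sy) ((m : Int) + 1))
          - (i : Int) - 1
      else 0
    bGo n sx sy xs ys m i dx' dy' ++ [ai]

def executeInstructions_alt (n : Int) (startPos : List Int) (s : String) : List Int :=
  if s.toList = [] then [] else
  let sy := PySem.List.pyGetD startPos 0 0   -- startPos[0]; Pre_ guarantees it exists
  let sx := PySem.List.pyGetD startPos 1 0   -- startPos[1]
  let xs := bPrefix bDX s.toList
  let ys := bPrefix bDY s.toList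
  let m := s.toList.length
  bGo n sx sy xs ys m m PySem.Dict.empty PySem.Dict.empty

-- ===== PRECONDITION & SPEC =====
-- Pre_ excludes nonempty s with startPos shorter than 2, where Python A raises IndexError on startPos[1].
def Pre_executeInstructions (n : Int) (startPos : List Int) (s : String) : Prop :=
  s.toList = [] ∨ 2 ≤ startPos.length
instance (n : Int) (startPos : List Int) (s : String) : Decidable (Pre_executeInstructions n startPos s) := by unfold Pre_executeInstructions; infer_instance

def pvWitness_executeInstructions : Int × List Int × String := (3, [1, 2], "RRDLU")

def Spec_executeInstructions (n : Int) (startPos : List Int) (s : String) (out : List Int) : Prop := out = executeInstructions_alt n startPos s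
instance (n : Int) (startPos : List Int) (s : String) (out : List Int) : Decidable (Spec_executeInstructions n startPos s out) := by unfold Spec_executeInstructions; infer_instance

-- ===== CLAIM (what is proved, stated in full; the proofs are below) =====
def Claim_equal_executeInstructions : Prop := ∀ (n : Int) (startPos : List Int) (s : String), Dom_executeInstructions n startPos s → Pre_executeInstructions n startPos s → Spec_executeInstructions n startPos s (executeInstructions n startPos s)

-- ===== LEMMAS AND PROOFS =====

-- cumulative displacement after k steps
def Xd (f : Char → Int) (cs : List Char) (k : Nat) : Int := ((cs.take k).map f).sum

-- 'in the grid after k steps of the suffix starting at i'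
def goodb (n sx sy : Int) (cs : List Char) (i k : Nat) : Bool :=
  decide (0 ≤ sx + Xd bDX cs k - Xd bDX cs i ∧ sx + Xd bDX cs k - Xd bDX cs i < n ∧
          0 ≤ sy + Xd bDY cs k - Xd bDY cs i ∧ sy + Xd bDY cs k - Xd bDY cs i < n)

-- count of consecutive good steps from k on
def cntA (n sx sy : Int) (cs : List Char) (i k : Nat) : Nat :=
  if k ≤ cs.length then
    (if goodb n sx sy cs i k then cntA n sx sy cs i (k + 1) + 1 else 0)
  else 0
termination_by cs.length + 1 - k
decreasing_by omega

-- first bad index ≥ k (or length+1 if none)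
def ffA (n sx sy : Int) (cs : List Char) (i k : Nat) : Nat :=
  if k ≤ cs.length then
    (if goodb n sx sy cs i k then ffA n sx sy cs i (k + 1) else k)
  else cs.length + 1
termination_by cs.length + 1 - k
decreasing_by omega

-- next occurrence of value v in the displacement sequence strictly after i
def nxt (f : Char → Int) (cs : List Char) (v : Int) (i : Nat) : Option Nat :=
  (List.range' (i + 1) (cs.length - i)).find? (fun k => decide (Xd f cs k = v))

def nxtD (f : Char → Int) (cs : List Char) (v : Int) (i : Nat) : Int :=
  match nxt f cs v i with
  | some j => (j : Int)
  | none => (cs.length : Int) + 1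

theorem Xd_succ (f : Char → Int) (cs : List Char) (k : Nat) (h : k < cs.length) :
    Xd f cs (k + 1) = Xd f cs k + f cs[k] := by
  unfold Xd
  rw [List.take_add_one, List.getElem?_eq_getElem h]
  simp
  rw [List.take_add_one]
  simp [List.getElem?_map, List.getElem?_eq_getElem h]

theorem bDX_bound (c : Char) : -1 ≤ bDX c ∧ bDX c ≤ 1 := by
  unfold bDX; split_ifs <;> omega

theorem bDY_bound (c : Char) : -1 ≤ bDY c ∧ bDY c ≤ 1 := by
  unfold bDY; split_ifs <;> omega

theorem ffA_ge (n sx sy : Int) (cs : List Char) (i k : Nat) (h : k ≤ cs.length + 1) :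
    k ≤ ffA n sx sy cs i k := by
  fun_induction ffA n sx sy cs i k with
  | case1 k hk hg ih => omega
  | case2 k hk hg => omega
  | case3 k hk => omega

theorem ffA_le (n sx sy : Int) (cs : List Char) (i k : Nat) :
    ffA n sx sy cs i k ≤ cs.length + 1 := by
  fun_induction ffA n sx sy cs i k with
  | case1 k hk hg ih => omega
  | case2 k hk hg => omega
  | case3 k hk => omega

theorem ffA_good (n sx sy : Int) (cs : List Char) (i k : Nat) :
    ∀ j, k ≤ j → j < ffA n sx sy cs i k → goodb n sx sy cs i j = true := by
  fun_induction ffA n sx sy cs i k with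
  | case1 k hk hg ih =>
    intro j h1 h2
    rcases eq_or_ne j k with rfl | hne
    · exact hg
    · exact ih j (by omega) h2
  | case2 k hk hg =>
    intro j h1 h2
    exact absurd h2 (by omega)
  | case3 k hk =>
    intro j h1 h2
    exact absurd h2 (by omega)

theorem ffA_bad (n sx sy : Int) (cs : List Char) (i k : Nat) :
    ffA n sx sy cs i k ≤ cs.length → goodb n sx sy cs i (ffA n sx sy cs i k) = false := by
  fun_induction ffA n sx sy cs i k with
  | case1 k hk hg ih => exact ih
  | case2 k hk hg => intro _; simpa using hg
  | case3 k hk => intro h; exact absurd h (by omega)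

theorem ffA_min (n sx sy : Int) (cs : List Char) (i k : Nat) :
    ∀ j, k ≤ j → j ≤ cs.length → goodb n sx sy cs i j = false → ffA n sx sy cs i k ≤ j := by
  fun_induction ffA n sx sy cs i k with
  | case1 k hk hg ih =>
    intro j h1 h2 h3
    rcases eq_or_ne j k with rfl | hne
    · rw [hg] at h3; exact absurd h3 (by simp)
    · exact ih j (by omega) h2 h3
  | case2 k hk hg => intro j h1 h2 h3; omega
  | case3 k hk => intro j h1 h2 h3; omega

theorem cntA_eq_ffA (n sx sy : Int) (cs : List Char) (i k : Nat) :
    cntA n sx sy cs i k = ffA n sx sy cs i k - k := by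
  fun_induction cntA n sx sy cs i k with
  | case1 k hk hg ih =>
    rw [ffA]
    simp only [if_pos hk, hg, if_true]
    have h1 := ffA_ge n sx sy cs i (k + 1) (by omega)
    omega
  | case2 k hk hg =>
    rw [ffA]
    simp [hk, hg]
  | case3 k hk =>
    rw [ffA]
    simp only [if_neg hk]
    omega

theorem nxt_none_ge (f : Char → Int) (cs : List Char) (v : Int) (i : Nat) (h : cs.length ≤ i) :
    nxt f cs v i = none := by
  simp [nxt, Nat.sub_eq_zero_of_le h]

theorem nxt_succ (f : Char → Int) (cs : List Char) (v : Int) (i : Nat) (h : i < cs.length) :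
    nxt f cs v i = if Xd f cs (i + 1) = v then some (i + 1) else nxt f cs v (i + 1) := by
  have hr : cs.length - i = (cs.length - (i + 1)) + 1 := by omega
  by_cases hx : Xd f cs (i + 1) = v
  · rw [if_pos hx]
    unfold nxt
    rw [hr, List.range'_succ]
    exact List.find?_cons_of_pos (p := fun k => decide (Xd f cs k = v)) (by simpa using hx)
  · rw [if_neg hx]
    unfold nxt
    rw [hr, List.range'_succ, List.find?_cons_of_neg (p := fun k => decide (Xd f cs k = v)) (by simpa using hx)]

theorem nxt_spec_some (f : Char → Int) (cs : List Char) (v : Int) (i j : Nat)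
    (h : nxt f cs v i = some j) : i < j ∧ j ≤ cs.length ∧ Xd f cs j = v := by
  have H : ∀ (d i : Nat), cs.length - i ≤ d → nxt f cs v i = some j →
      i < j ∧ j ≤ cs.length ∧ Xd f cs j = v := by
    intro d
    induction d with
    | zero =>
      intro i hd h
      rw [nxt_none_ge f cs v i (by omega)] at h
      exact absurd h (by simp)
    | succ d ih =>
      intro i hd h
      by_cases hi : i < cs.length
      · rw [nxt_succ f cs v i hi] at h
        by_cases hx : Xd f cs (i + 1) = v
        · rw [if_pos hx] at h
          have : j = i + 1 := by
            have := Option.some.inj h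
            omega
          subst this
          exact ⟨by omega, by omega, hx⟩
        · rw [if_neg hx] at h
          have := ih (i + 1) (by omega) h
          exact ⟨by omega, this.2.1, this.2.2⟩
      · rw [nxt_none_ge f cs v i (by omega)] at h
        exact absurd h (by simp)
  exact H (cs.length - i) i le_rfl h

theorem nxt_le (f : Char → Int) (cs : List Char) (v : Int) (i k : Nat)
    (h1 : i < k) (h2 : k ≤ cs.length) (h3 : Xd f cs k = v) :
    ∃ j, nxt f cs v i = some j ∧ j ≤ k := by
  have H : ∀ (d i : Nat), cs.length - i ≤ d → i < k →
      ∃ j, nxt f cs v i = some j ∧ j ≤ k := by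
    intro d
    induction d with
    | zero => intro i hd hik; omega
    | succ d ih =>
      intro i hd hik
      have hi : i < cs.length := by omega
      rw [nxt_succ f cs v i hi]
      by_cases hx : Xd f cs (i + 1) = v
      · exact ⟨i + 1, by rw [if_pos hx], by omega⟩
      · have hik' : i + 1 < k := by
          rcases Nat.lt_or_ge (i + 1) k with h' | h'
          · exact h'
          · have : k = i + 1 := by omega
            exact absurd (this ▸ h3) hx
        rw [if_neg hx]
        exact ih (i + 1) (by omega) hik'
  exact H (cs.length - i) i le_rfl h1

theorem nxtD_le (f : Char → Int) (cs : List Char) (v : Int) (i : Nat) :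
    nxtD f cs v i ≤ (cs.length : Int) + 1 := by
  unfold nxtD
  cases h : nxt f cs v i with
  | none => simp
  | some j =>
    have := nxt_spec_some f cs v i j h
    simp; omega

theorem nxtD_of_none (f : Char → Int) (cs : List Char) (v : Int) (i : Nat)
    (h : nxt f cs v i = none) : nxtD f cs v i = (cs.length : Int) + 1 := by
  unfold nxtD; rw [h]

theorem nxtD_of_some (f : Char → Int) (cs : List Char) (v : Int) (i j : Nat)
    (h : nxt f cs v i = some j) : nxtD f cs v i = (j : Int) := by
  unfold nxtD; rw [h]

-- a displacement hitting one of the four boundary values is out of the grid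
theorem hit_bad (n sx sy : Int) (cs : List Char) (i k : Nat)
    (h : Xd bDX cs k = Xd bDX cs i - sx - 1 ∨ Xd bDX cs k = Xd bDX cs i + n - sx ∨
         Xd bDY cs k = Xd bDY cs i - sy - 1 ∨ Xd bDY cs k = Xd bDY cs i + n - sy) :
    goodb n sx sy cs i k = false := by
  simp only [goodb, decide_eq_false_iff_not]
  rintro ⟨h1, h2, h3, h4⟩
  rcases h with h | h | h | h <;> omega

-- the key alignment: the minimum of the four next boundary hits is the first bad index
theorem cross_eq (n sx sy : Int) (cs : List Char) (i : Nat) (him : i < cs.length)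
    (hg : goodb n sx sy cs i (i + 1) = true) :
    min (min (min (nxtD bDX cs (Xd bDX cs i - sx - 1) i)
                  (nxtD bDX cs (Xd bDX cs i + n - sx) i))
             (nxtD bDY cs (Xd bDY cs i - sy - 1) i))
        (nxtD bDY cs (Xd bDY cs i + n - sy) i)
      = (ffA n sx sy cs i (i + 1) : Int) := by
  have hF2 : i + 2 ≤ ffA n sx sy cs i (i + 1) := by
    rw [ffA, if_pos (show i + 1 ≤ cs.length by omega), if_pos hg]
    exact ffA_ge n sx sy cs i (i + 2) (by omega)
  set F := ffA n sx sy cs i (i + 1) with hF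
  have hFle : F ≤ cs.length + 1 := ffA_le n sx sy cs i (i + 1)
  have hgood : ∀ j, i + 1 ≤ j → j < F → goodb n sx sy cs i j = true :=
    ffA_good n sx sy cs i (i + 1)
  have low : ∀ (g : Char → Int) (v : Int),
      (∀ k, Xd g cs k = v → goodb n sx sy cs i k = false) → (F : Int) ≤ nxtD g cs v i := by
    intro g v hbad
    cases h : nxt g cs v i with
    | none =>
      rw [nxtD_of_none g cs v i h]
      exact_mod_cast hFle
    | some j =>
      have hs := nxt_spec_some g cs v i j h
      have := ffA_min n sx sy cs i (i + 1) j (by omega) hs.2.1 (hbad j hs.2.2)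
      rw [nxtD_of_some g cs v i j h]
      exact_mod_cast this
  have h1 : (F : Int) ≤ nxtD bDX cs (Xd bDX cs i - sx - 1) i :=
    low _ _ (fun k hk => hit_bad n sx sy cs i k (Or.inl hk))
  have h2 : (F : Int) ≤ nxtD bDX cs (Xd bDX cs i + n - sx) i :=
    low _ _ (fun k hk => hit_bad n sx sy cs i k (Or.inr (Or.inl hk)))
  have h3 : (F : Int) ≤ nxtD bDY cs (Xd bDY cs i - sy - 1) i :=
    low _ _ (fun k hk => hit_bad n sx sy cs i k (Or.inr (Or.inr (Or.inl hk))))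
  have h4 : (F : Int) ≤ nxtD bDY cs (Xd bDY cs i + n - sy) i :=
    low _ _ (fun k hk => hit_bad n sx sy cs i k (Or.inr (Or.inr (Or.inr hk))))
  have h5 : nxtD bDX cs (Xd bDX cs i - sx - 1) i ≤ (F : Int) ∨
      nxtD bDX cs (Xd bDX cs i + n - sx) i ≤ (F : Int) ∨
      nxtD bDY cs (Xd bDY cs i - sy - 1) i ≤ (F : Int) ∨
      nxtD bDY cs (Xd bDY cs i + n - sy) i ≤ (F : Int) := by
    by_cases hFm : F ≤ cs.length
    · have hbadF : goodb n sx sy cs i F = false := hF ▸ ffA_bad n sx sy cs i (i + 1) (hF ▸ hFm)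
      have hgoodF1 : goodb n sx sy cs i (F - 1) = true := hgood (F - 1) (by omega) (by omega)
      have hFlt : F - 1 < cs.length := by omega
      have hsx := Xd_succ bDX cs (F - 1) hFlt
      have hsy := Xd_succ bDY cs (F - 1) hFlt
      rw [show F - 1 + 1 = F by omega] at hsx hsy
      have hbx := bDX_bound (cs[F - 1])
      have hby := bDY_bound (cs[F - 1])
      simp only [goodb, decide_eq_true_eq] at hgoodF1
      simp only [goodb, decide_eq_false_iff_not] at hbadF
      have hhit : Xd bDX cs F = Xd bDX cs i - sx - 1 ∨ Xd bDX cs F = Xd bDX cs i + n - sx ∨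
          Xd bDY cs F = Xd bDY cs i - sy - 1 ∨ Xd bDY cs F = Xd bDY cs i + n - sy := by
        omega
      have comp : ∀ (g : Char → Int) (v : Int), Xd g cs F = v → nxtD g cs v i ≤ (F : Int) := by
        intro g v hv
        obtain ⟨j, hj, hjle⟩ := nxt_le g cs v i F (by omega) hFm hv
        rw [nxtD_of_some g cs v i j hj]
        exact_mod_cast hjle
      rcases hhit with h | h | h | h
      · exact Or.inl (comp _ _ h)
      · exact Or.inr (Or.inl (comp _ _ h))
      · exact Or.inr (Or.inr (Or.inl (comp _ _ h)))
      · exact Or.inr (Or.inr (Or.inr (comp _ _ h)))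
    · have hFeq : F = cs.length + 1 := by omega
      have := nxtD_le bDX cs (Xd bDX cs i - sx - 1) i
      exact Or.inl (by omega)
  omega

-- ===== A side =====

theorem moveX (c : Char) (x : Int) :
    (if c = 'R' then x + 1 else if c = 'L' then x - 1 else x) = x + bDX c := by
  unfold bDX; split_ifs <;> simp_all <;> omega

theorem moveY (c : Char) (y : Int) :
    (if c = 'U' then y - 1 else if c = 'D' then y + 1 else y) = y + bDY c := by
  unfold bDY; split_ifs <;> simp_all <;> omega

theorem aInner_eq (n sx sy : Int) (cs : List Char) (i : Nat) :
    ∀ (k : Nat) (x y c : Int),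
      x = sx + Xd bDX cs k - Xd bDX cs i → y = sy + Xd bDY cs k - Xd bDY cs i →
      aInner n (cs.drop k) x y c = c + (cntA n sx sy cs i (k + 1) : Int) := by
  have H : ∀ (d k : Nat) (x y c : Int), cs.length - k ≤ d →
      x = sx + Xd bDX cs k - Xd bDX cs i → y = sy + Xd bDY cs k - Xd bDY cs i →
      aInner n (cs.drop k) x y c = c + (cntA n sx sy cs i (k + 1) : Int) := by
    intro d
    induction d with
    | zero =>
      intro k x y c hd hx hy
      rw [List.drop_eq_nil_of_le (by omega)]
      rw [cntA, if_neg (by omega)]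
      simp [aInner]
    | succ d ih =>
      intro k x y c hd hx hy
      by_cases hk : k < cs.length
      · rw [List.drop_eq_getElem_cons hk]
        simp only [aInner, moveX, moveY]
        have hx' : x + bDX cs[k] = sx + Xd bDX cs (k + 1) - Xd bDX cs i := by
          rw [hx, Xd_succ bDX cs k hk]; ring
        have hy' : y + bDY cs[k] = sy + Xd bDY cs (k + 1) - Xd bDY cs i := by
          rw [hy, Xd_succ bDY cs k hk]; ring
        rw [hx', hy']
        by_cases hg : goodb n sx sy cs i (k + 1) = true
        · have hgp : 0 ≤ sx + Xd bDX cs (k + 1) - Xd bDX cs i ∧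
              sx + Xd bDX cs (k + 1) - Xd bDX cs i < n ∧
              0 ≤ sy + Xd bDY cs (k + 1) - Xd bDY cs i ∧
              sy + Xd bDY cs (k + 1) - Xd bDY cs i < n := by
            simpa [goodb] using hg
          rw [if_pos hgp, ih (k + 1) _ _ (c + 1) (by omega) rfl rfl]
          conv_rhs => rw [cntA]
          rw [if_pos (show k + 1 ≤ cs.length by omega), if_pos hg]
          push_cast
          ring
        · have hgp : ¬ (0 ≤ sx + Xd bDX cs (k + 1) - Xd bDX cs i ∧
              sx + Xd bDX cs (k + 1) - Xd bDX cs i < n ∧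
              0 ≤ sy + Xd bDY cs (k + 1) - Xd bDY cs i ∧
              sy + Xd bDY cs (k + 1) - Xd bDY cs i < n) := by
            simpa [goodb] using hg
          rw [if_neg hgp]
          rw [cntA, if_pos (by omega), if_neg (by simp [hg])]
          simp
      · rw [List.drop_eq_nil_of_le (by omega)]
        rw [cntA, if_neg (by omega)]
        simp [aInner]
  intro k x y c hx hy
  exact H (cs.length - k) k x y c le_rfl hx hy

-- ===== B side =====

def pref (f : Char → Int) (a : Int) : List Char → List Int
  | [] => [a]
  | c :: cs => a :: pref f (a + f c) cs

theorem bPrefix_eq_pref_aux (f : Char → Int) (cs : List Char) :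
    ∀ (l : List Int) (a : Int),
      cs.foldl (fun l c => l ++ [PySem.List.pyGetD l (-1) 0 + f c]) (l ++ [a]) = l ++ pref f a cs := by
  induction cs with
  | nil => intro l a; simp [pref]
  | cons c cs ih =>
    intro l a
    simp only [List.foldl_cons, PySem.List.pyGetD_neg_one_append_singleton]
    have := ih (l ++ [a]) (a + f c)
    simpa [pref] using this

theorem bPrefix_eq_pref (f : Char → Int) (cs : List Char) : bPrefix f cs = pref f 0 cs := by
  have := bPrefix_eq_pref_aux f cs [] 0
  simpa [bPrefix] using this

theorem pref_getD (f : Char → Int) (cs : List Char) :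
    ∀ (k : Nat) (a : Int), k ≤ cs.length → (pref f a cs).getD k 0 = a + Xd f cs k := by
  induction cs with
  | nil =>
    intro k a hk
    have : k = 0 := by simpa using hk
    subst this
    simp [pref, Xd]
  | cons c cs ih =>
    intro k a hk
    cases k with
    | zero => simp [pref, Xd]
    | succ k =>
      have := ih k (a + f c) (by simpa using hk)
      simp only [pref, List.getD_cons_succ, this, Xd, List.take_succ_cons, List.map_cons,
        List.sum_cons]
      ring

theorem bPrefix_getD (f : Char → Int) (cs : List Char) (k : Nat) (h : k ≤ cs.length) :
    PySem.List.pyGetD (bPrefix f cs) (k : Int) 0 = Xd f cs k := by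
  rw [PySem.List.pyGetD_natCast, bPrefix_eq_pref]
  have := pref_getD f cs k 0 h
  omega

theorem nxtD_succ (f : Char → Int) (cs : List Char) (v : Int) (i : Nat) (hi : i < cs.length) :
    nxtD f cs v i = if Xd f cs (i + 1) = v then ((i : Int) + 1) else nxtD f cs v (i + 1) := by
  unfold nxtD
  rw [nxt_succ f cs v i hi]
  by_cases hx : Xd f cs (i + 1) = v
  · rw [if_pos hx, if_pos hx]; push_cast; ring
  · rw [if_neg hx, if_neg hx]

theorem bGo_eq (n sx sy : Int) (cs : List Char) :
    ∀ (i : Nat), i ≤ cs.length → ∀ (dx dy : PySem.Dict Int Int),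
      (∀ v, dx.getD v ((cs.length : Int) + 1) = nxtD bDX cs v i) →
      (∀ v, dy.getD v ((cs.length : Int) + 1) = nxtD bDY cs v i) →
      bGo n sx sy (bPrefix bDX cs) (bPrefix bDY cs) cs.length i dx dy
        = (List.range i).map (fun j =>
            if goodb n sx sy cs j (j + 1) = true then (ffA n sx sy cs j (j + 1) : Int) - j - 1 else 0) := by
  intro i
  induction i with
  | zero => intro _ dx dy _ _; simp [bGo]
  | succ i ih =>
    intro him dx dy hdx hdy
    have hi : i < cs.length := by omega
    have e1 : PySem.List.pyGetD (bPrefix bDX cs) ((i : Int) + 1) 0 = Xd bDX cs (i + 1) := by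
      rw [show ((i : Int) + 1) = ((i + 1 : Nat) : Int) by push_cast; ring]
      exact bPrefix_getD bDX cs (i + 1) him
    have e2 : PySem.List.pyGetD (bPrefix bDX cs) (i : Int) 0 = Xd bDX cs i :=
      bPrefix_getD bDX cs i (by omega)
    have e3 : PySem.List.pyGetD (bPrefix bDY cs) ((i : Int) + 1) 0 = Xd bDY cs (i + 1) := by
      rw [show ((i : Int) + 1) = ((i + 1 : Nat) : Int) by push_cast; ring]
      exact bPrefix_getD bDY cs (i + 1) him
    have e4 : PySem.List.pyGetD (bPrefix bDY cs) (i : Int) 0 = Xd bDY cs i :=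
      bPrefix_getD bDY cs i (by omega)
    have hdx' : ∀ v, ((dx.insert (Xd bDX cs (i + 1)) ((i : Int) + 1)).getD v ((cs.length : Int) + 1))
        = nxtD bDX cs v i := by
      intro v
      rw [PySem.Dict.getD_insert, nxtD_succ bDX cs v i hi]
      rcases eq_or_ne v (Xd bDX cs (i + 1)) with h | h
      · rw [if_pos h, if_pos h.symm]
      · rw [if_neg h, if_neg (fun hh => h hh.symm), hdx v]
    have hdy' : ∀ v, ((dy.insert (Xd bDY cs (i + 1)) ((i : Int) + 1)).getD v ((cs.length : Int) + 1))
        = nxtD bDY cs v i := by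
      intro v
      rw [PySem.Dict.getD_insert, nxtD_succ bDY cs v i hi]
      rcases eq_or_ne v (Xd bDY cs (i + 1)) with h | h
      · rw [if_pos h, if_pos h.symm]
      · rw [if_neg h, if_neg (fun hh => h hh.symm), hdy v]
    simp only [bGo, e1, e2, e3, e4]
    rw [ih (by omega) _ _ hdx' hdy', List.range_succ, List.map_append]
    congr 1
    by_cases hgb : goodb n sx sy cs i (i + 1) = true
    · have hp : 0 ≤ sx + Xd bDX cs (i + 1) - Xd bDX cs i ∧
          sx + Xd bDX cs (i + 1) - Xd bDX cs i < n ∧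
          0 ≤ sy + Xd bDY cs (i + 1) - Xd bDY cs i ∧
          sy + Xd bDY cs (i + 1) - Xd bDY cs i < n := by
        simpa [goodb] using hgb
      rw [if_pos hp]
      rw [hdx' _, hdx' _, hdy' _, hdy' _]
      rw [cross_eq n sx sy cs i hi hgb]
      simp [hgb]
    · have hp : ¬ (0 ≤ sx + Xd bDX cs (i + 1) - Xd bDX cs i ∧
          sx + Xd bDX cs (i + 1) - Xd bDX cs i < n ∧
          0 ≤ sy + Xd bDY cs (i + 1) - Xd bDY cs i ∧
          sy + Xd bDY cs (i + 1) - Xd bDY cs i < n) := by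
        simpa [goodb] using hgb
      rw [if_neg hp]
      simp [hgb]

-- ===== assembly =====

theorem entry_eq (n sx sy : Int) (cs : List Char) (j : Nat) (h : j < cs.length) :
    (cntA n sx sy cs j (j + 1) : Int)
      = if goodb n sx sy cs j (j + 1) = true then (ffA n sx sy cs j (j + 1) : Int) - j - 1 else 0 := by
  by_cases hg : goodb n sx sy cs j (j + 1) = true
  · rw [if_pos hg, cntA_eq_ffA]
    have h1 := ffA_ge n sx sy cs j (j + 1) (by omega)
    push_cast [Nat.cast_sub h1]
    ring
  · rw [if_neg hg, cntA, if_pos (by omega), if_neg (by simp [hg])]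
    simp

theorem foldl_append_singleton_map {α β : Type} (f : α → β) (xs : List α) :
    xs.foldl (fun acc i => acc ++ [f i]) [] = xs.map f := by
  simpa using PySem.List.foldl_append_singleton_eq_map f xs []

theorem executeInstructions_spec_aux (n : Int) (startPos : List Int) (s : String) :
    executeInstructions n startPos s = executeInstructions_alt n startPos s := by
  rcases eq_or_ne s.toList [] with hnil | hne
  · simp [executeInstructions, executeInstructions_alt, hnil, PySem.Str.len_eq]
  · unfold executeInstructions executeInstructions_alt
    rw [if_neg hne]
    rw [foldl_append_singleton_map]
    rw [bGo_eq n (PySem.List.pyGetD startPos 1 0) (PySem.List.pyGetD startPos 0 0) s.toList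
      s.toList.length le_rfl PySem.Dict.empty PySem.Dict.empty
      (fun v => by
        rw [PySem.Dict.getD_empty,
          nxtD_of_none bDX s.toList v s.toList.length (nxt_none_ge bDX s.toList v s.toList.length le_rfl)])
      (fun v => by
        rw [PySem.Dict.getD_empty,
          nxtD_of_none bDY s.toList v s.toList.length (nxt_none_ge bDY s.toList v s.toList.length le_rfl)])]
    rw [PySem.Str.len_eq, PySem.List.pyRange_one]
    simp only [Int.sub_zero, Int.toNat_natCast, List.map_map]
    apply List.map_congr_left
    intro j hj
    rw [List.mem_range] at hj
    simp only [Function.comp_apply, zero_add]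
    rw [PySem.List.slice_from s.toList (by positivity)]
    rw [Int.toNat_natCast]
    rw [aInner_eq n (PySem.List.pyGetD startPos 1 0) (PySem.List.pyGetD startPos 0 0) s.toList j j
      _ _ 0 (by ring) (by ring)]
    simpa using entry_eq n (PySem.List.pyGetD startPos 1 0) (PySem.List.pyGetD startPos 0 0) s.toList j hj

-- ===== VERDICT (by name: the statement is the Claim_ definition above) =====
theorem executeInstructions_spec : Claim_equal_executeInstructions := by
  intro n startPos s _ _
  exact executeInstructions_spec_aux n startPos s
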